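-- pv_equiv track=rewrite | github.com/DylanSteinecke/classifying_pubmed_documents | get_pubmed_docs.py | map_seed_tree_numbers_to_seed_terms
-- ===== SOURCE A (Python) =====
-- from itertools import chain
--
-- def map_seed_tree_numbers_to_seed_terms(seed_tree_numbers, tree_to_term):
--     '''Map a list of lists of MeSH tree numbers to all the MeSH terms that
--        correspond to the tree number and that are lower level terms under that
--        part of the tree'''
--     all_seeds_terms = []
--     for seeds in seed_tree_numbers:
--         seed_terms = []
--         for seed in seeds:
--             seed_terms += [term for tree, term in tree_to_term.items() if tree.startswith(seed)]
--         seed_terms = list(chain(*seed_terms))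
--         all_seeds_terms.append(seed_terms)
--     return all_seeds_terms
-- ===== SOURCE B (Python) =====
-- def map_seed_tree_numbers_to_seed_terms(seed_tree_numbers, tree_to_term):
--     '''Map a list of lists of MeSH tree numbers to all the MeSH terms that
--        correspond to the tree number and that are lower level terms under that
--        part of the tree'''
--     buckets = {}
--     for seeds in seed_tree_numbers:
--         for seed in seeds:
--             buckets[seed] = []
--     for tree, terms in tree_to_term.items():
--         for seed in buckets:
--             if tree.startswith(seed):
--                 buckets[seed].extend(terms)
--     return [[t for seed in seeds for t in buckets[seed]] for seeds in seed_tree_numbers]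
-- ===== Notes on version B (the rewrite author's own statement) =====
-- stated objective: alternative
-- what changed: B inverts the loop nesting: instead of re-scanning tree_to_term once per seed occurrence and flattening with chain, it builds one bucket per distinct seed and fills all buckets in a single pass over tree_to_term, then assembles each group by bucket lookup.
import Mathlib
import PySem

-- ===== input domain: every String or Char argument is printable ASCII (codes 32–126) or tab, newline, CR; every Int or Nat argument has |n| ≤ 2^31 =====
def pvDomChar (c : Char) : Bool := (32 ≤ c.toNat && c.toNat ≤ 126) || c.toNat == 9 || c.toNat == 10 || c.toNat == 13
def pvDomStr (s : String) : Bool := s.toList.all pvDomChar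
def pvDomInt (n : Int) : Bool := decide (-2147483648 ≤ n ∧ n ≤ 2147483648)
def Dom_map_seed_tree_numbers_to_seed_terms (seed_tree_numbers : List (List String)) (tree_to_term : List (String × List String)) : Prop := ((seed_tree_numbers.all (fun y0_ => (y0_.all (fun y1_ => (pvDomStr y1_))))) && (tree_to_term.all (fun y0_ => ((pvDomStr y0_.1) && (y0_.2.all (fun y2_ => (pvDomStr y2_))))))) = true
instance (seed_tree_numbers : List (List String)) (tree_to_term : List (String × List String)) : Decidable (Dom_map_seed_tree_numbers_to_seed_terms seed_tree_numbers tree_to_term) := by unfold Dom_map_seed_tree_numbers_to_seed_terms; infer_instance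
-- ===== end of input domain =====

-- B inverts the loop nesting: one bucket per distinct seed, filled in a single pass over
-- tree_to_term, instead of re-scanning the whole dict once per seed occurrence ('alternative').

-- ===== PORT A =====
def map_seed_tree_numbers_to_seed_terms (seed_tree_numbers : List (List String)) (tree_to_term : List (String × List String)) : List (List String) :=
  seed_tree_numbers.foldl (fun all_seeds_terms seeds =>
    let seed_terms : List (List String) :=
      seeds.foldl (fun acc seed =>
        acc ++ (tree_to_term.filter (fun p => PySem.Str.startswith p.1 seed)).map (fun p => p.2)) []
    all_seeds_terms ++ [seed_terms.flatten]) []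

-- ===== PORT B =====
def map_seed_tree_numbers_to_seed_terms_alt (seed_tree_numbers : List (List String)) (tree_to_term : List (String × List String)) : List (List String) :=
  let buckets0 : PySem.Dict String (List String) :=
    seed_tree_numbers.foldl (fun d seeds => seeds.foldl (fun d s => d.insert s []) d) PySem.Dict.empty
  let buckets : PySem.Dict String (List String) :=
    tree_to_term.foldl (fun d p =>
      d.keys.foldl (fun d' s =>
        if PySem.Str.startswith p.1 s then d'.modify s [] (fun v => v ++ p.2) else d') d) buckets0
  seed_tree_numbers.map (fun seeds => seeds.flatMap (fun s => buckets.getD s []))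

-- ===== PRECONDITION & SPEC =====
def Spec_map_seed_tree_numbers_to_seed_terms (seed_tree_numbers : List (List String)) (tree_to_term : List (String × List String)) (out : List (List String)) : Prop := out = map_seed_tree_numbers_to_seed_terms_alt seed_tree_numbers tree_to_term
instance (seed_tree_numbers : List (List String)) (tree_to_term : List (String × List String)) (out : List (List String)) : Decidable (Spec_map_seed_tree_numbers_to_seed_terms seed_tree_numbers tree_to_term out) := by unfold Spec_map_seed_tree_numbers_to_seed_terms; infer_instance

-- ===== CLAIM (what is proved, stated in full; the proofs are below) =====
def Claim_equal_map_seed_tree_numbers_to_seed_terms : Prop := ∀ (seed_tree_numbers : List (List String)) (tree_to_term : List (String × List String)), Dom_map_seed_tree_numbers_to_seed_terms seed_tree_numbers tree_to_term → Spec_map_seed_tree_numbers_to_seed_terms seed_tree_numbers tree_to_term (map_seed_tree_numbers_to_seed_terms seed_tree_numbers tree_to_term)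

-- ===== LEMMAS AND PROOFS =====

-- canonical value of one seed's matches, in dict order
def matchTerms (tree_to_term : List (String × List String)) (s : String) : List String :=
  ((tree_to_term.filter (fun p => PySem.Str.startswith p.1 s)).map (fun p => p.2)).flatten

theorem foldl_append_singleton {α β : Type} (f : α → β) :
    ∀ (l : List α) (acc : List β), l.foldl (fun a x => a ++ [f x]) acc = acc ++ l.map f := by
  intro l
  induction l with
  | nil => simp
  | cons a l ih => intro acc; simp [List.foldl_cons, ih]

theorem flatten_flatMap {α β : Type} (g : α → List (List β)) :
    ∀ (l : List α), (l.flatMap g).flatten = l.flatMap (fun x => (g x).flatten) := by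
  intro l
  induction l with
  | nil => rfl
  | cons a l ih => simp [List.flatMap_cons, List.flatten_append, ih]

theorem portA_eq (stn : List (List String)) (ttt : List (String × List String)) :
    map_seed_tree_numbers_to_seed_terms stn ttt
      = stn.map (fun seeds => seeds.flatMap (fun s => matchTerms ttt s)) := by
  unfold map_seed_tree_numbers_to_seed_terms
  have h : ∀ seeds : List String,
      (seeds.foldl (fun acc seed =>
        acc ++ (ttt.filter (fun p => PySem.Str.startswith p.1 seed)).map (fun p => p.2)) []).flatten
      = seeds.flatMap (fun s => matchTerms ttt s) := by
    intro seeds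
    rw [PySem.List.foldl_append_eq_flatMap]
    simp only [List.nil_append]
    rw [flatten_flatMap]
    rfl
  calc stn.foldl (fun all seeds =>
        all ++ [(seeds.foldl (fun acc seed =>
          acc ++ (ttt.filter (fun p => PySem.Str.startswith p.1 seed)).map (fun p => p.2)) []).flatten]) []
      = stn.map (fun seeds => (seeds.foldl (fun acc seed =>
          acc ++ (ttt.filter (fun p => PySem.Str.startswith p.1 seed)).map (fun p => p.2)) []).flatten) := by
        rw [foldl_append_singleton]; rfl
    _ = _ := by
        apply List.map_congr_left; intro seeds _; exact h seeds

-- ---- B-side: buckets0 facts ----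

theorem getD_foldl_insert_nil (x : String) :
    ∀ (l : List String) (d : PySem.Dict String (List String)),
      (∀ y, d.getD y [] = []) →
      ((l.foldl (fun d s => d.insert s ([] : List String)) d).getD x [] = []) := by
  intro l
  induction l with
  | nil => intro d h; exact h x
  | cons a l ih =>
    intro d h
    refine ih _ (fun y => ?_)
    rw [PySem.Dict.getD_insert]
    split <;> simp [h]

theorem buckets0_getD (stn : List (List String)) (x : String) :
    ∀ (d : PySem.Dict String (List String)), (∀ y, d.getD y [] = []) →
      ((stn.foldl (fun d seeds => seeds.foldl (fun d s => d.insert s ([] : List String)) d) d).getD x [] = []) := by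
  induction stn with
  | nil => intro d h; exact h x
  | cons seeds stn ih =>
    intro d h
    refine ih _ (fun y => ?_)
    exact getD_foldl_insert_nil y seeds d h

theorem mem_keys_foldl_insert (x : String) :
    ∀ (l : List String) (d : PySem.Dict String (List String)),
      (x ∈ (l.foldl (fun d s => d.insert s ([] : List String)) d).keys ↔ x ∈ l ∨ x ∈ d.keys) := by
  intro l
  induction l with
  | nil => intro d; simp
  | cons a l ih =>
    intro d
    rw [List.foldl_cons, ih]
    simp [PySem.Dict.mem_keys_insert]
    tauto

theorem mem_keys_buckets0 (x : String) :
    ∀ (stn : List (List String)) (d : PySem.Dict String (List String)),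
      (x ∈ (stn.foldl (fun d seeds => seeds.foldl (fun d s => d.insert s ([] : List String)) d) d).keys
        ↔ (∃ seeds ∈ stn, x ∈ seeds) ∨ x ∈ d.keys) := by
  intro stn
  induction stn with
  | nil => intro d; simp
  | cons seeds stn ih =>
    intro d
    rw [List.foldl_cons, ih, mem_keys_foldl_insert]
    simp only [List.mem_cons]
    constructor
    · rintro (⟨u, hu, hxu⟩ | h | h)
      · exact Or.inl ⟨u, Or.inr hu, hxu⟩
      · exact Or.inl ⟨seeds, Or.inl rfl, h⟩
      · exact Or.inr h
    · rintro (⟨u, (rfl | hu), hxu⟩ | h)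
      · exact Or.inr (Or.inl hxu)
      · exact Or.inl ⟨u, hu, hxu⟩
      · exact Or.inr (Or.inr h)

theorem nodup_keys_foldl_insert :
    ∀ (l : List String) (d : PySem.Dict String (List String)), d.keys.Nodup →
      ((l.foldl (fun d s => d.insert s ([] : List String)) d).keys.Nodup) := by
  intro l
  induction l with
  | nil => intro d h; exact h
  | cons a l ih =>
    intro d h
    exact ih _ (PySem.Dict.nodup_keys_insert _ _ _ h)

theorem nodup_keys_buckets0 :
    ∀ (stn : List (List String)) (d : PySem.Dict String (List String)), d.keys.Nodup →
      ((stn.foldl (fun d seeds => seeds.foldl (fun d s => d.insert s ([] : List String)) d) d).keys.Nodup) := by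
  intro stn
  induction stn with
  | nil => intro d h; exact h
  | cons seeds stn ih =>
    intro d h
    exact ih _ (nodup_keys_foldl_insert seeds d h)

-- ---- B-side: the filling pass ----

theorem inner_fold_keys (t : String) (ts : List String) :
    ∀ (ks : List String) (d : PySem.Dict String (List String)), (∀ s ∈ ks, s ∈ d.keys) →
      ((ks.foldl (fun d' s => if PySem.Str.startswith t s then d'.modify s [] (fun v => v ++ ts) else d') d).keys = d.keys) := by
  intro ks
  induction ks with
  | nil => intro d _; rfl
  | cons a ks ih =>
    intro d h
    rw [List.foldl_cons]
    by_cases hm : PySem.Str.startswith t a = true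
    · have hk : (d.modify a [] (fun v => v ++ ts)).keys = d.keys := by
        rw [PySem.Dict.keys_modify, PySem.Dict.keys_insert_of_contains]
        rw [PySem.Dict.contains_eq_decide_mem_keys]
        exact decide_eq_true (h a (List.mem_cons_self))
      rw [hm]
      simp only [if_true]
      rw [ih _ (fun s hs => by rw [hk]; exact h s (List.mem_cons_of_mem _ hs)), hk]
    · simp only [hm]
      simp only [if_false, Bool.false_eq_true]
      exact ih _ (fun s hs => h s (List.mem_cons_of_mem _ hs))

theorem inner_fold_getD (t : String) (ts : List String) (x : String) :
    ∀ (ks : List String) (d : PySem.Dict String (List String)), ks.Nodup →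
      ((ks.foldl (fun d' s => if PySem.Str.startswith t s then d'.modify s [] (fun v => v ++ ts) else d') d).getD x []
        = if x ∈ ks ∧ PySem.Str.startswith t x then d.getD x [] ++ ts else d.getD x []) := by
  intro ks
  induction ks with
  | nil => intro d _; simp
  | cons a ks ih =>
    intro d hnd
    rw [List.foldl_cons, ih _ hnd.of_cons]
    by_cases hax : x = a
    · subst hax
      have hx : x ∉ ks := (List.nodup_cons.mp hnd).1
      by_cases hm : PySem.Chars.startswith t.toList x.toList = true
      · simp [hx, hm]
      · simp [hx, hm]
    · have hg : ∀ d' : PySem.Dict String (List String),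
          (if PySem.Str.startswith t a then d'.modify a [] (fun v => v ++ ts) else d').getD x [] = d'.getD x [] := by
        intro d'
        by_cases hm : PySem.Chars.startswith t.toList a.toList = true
        · simp [hm, PySem.Dict.getD_modify, hax]
        · simp [hm]
      rw [hg]
      simp [hax]

theorem fill_fold_getD (x : String) :
    ∀ (ttt : List (String × List String)) (d : PySem.Dict String (List String)), d.keys.Nodup →
      ((ttt.foldl (fun d p =>
        d.keys.foldl (fun d' s => if PySem.Str.startswith p.1 s then d'.modify s [] (fun v => v ++ p.2) else d') d) d).getD x []
        = if x ∈ d.keys then d.getD x [] ++ matchTerms ttt x else d.getD x []) := by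
  intro ttt
  induction ttt with
  | nil => intro d _; simp [matchTerms]
  | cons p ttt ih =>
    intro d hnd
    rw [List.foldl_cons]
    have hkeys : ((d.keys.foldl (fun d' s => if PySem.Str.startswith p.1 s then d'.modify s [] (fun v => v ++ p.2) else d') d)).keys = d.keys :=
      inner_fold_keys p.1 p.2 d.keys d (fun s hs => hs)
    rw [ih _ (by rw [hkeys]; exact hnd), hkeys, inner_fold_getD p.1 p.2 x d.keys d hnd]
    by_cases hx : x ∈ d.keys
    · by_cases hm : PySem.Chars.startswith p.1.toList x.toList = true
      · simp [hx, hm, matchTerms, List.append_assoc]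
      · simp [hx, hm, matchTerms]
    · simp [hx]

theorem portB_eq (stn : List (List String)) (ttt : List (String × List String)) :
    map_seed_tree_numbers_to_seed_terms_alt stn ttt
      = stn.map (fun seeds => seeds.flatMap (fun s => matchTerms ttt s)) := by
  unfold map_seed_tree_numbers_to_seed_terms_alt
  apply List.map_congr_left
  intro seeds hseeds
  have hb0nd : (stn.foldl (fun d seeds => seeds.foldl (fun d s => d.insert s ([] : List String)) d) PySem.Dict.empty).keys.Nodup :=
    nodup_keys_buckets0 stn PySem.Dict.empty (by simp [PySem.Dict.keys_empty])
  refine List.flatMap_congr fun s hs => ?_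
  rw [fill_fold_getD s ttt _ hb0nd]
  have hsK : s ∈ (stn.foldl (fun d seeds => seeds.foldl (fun d s => d.insert s ([] : List String)) d) PySem.Dict.empty).keys := by
    rw [mem_keys_buckets0]
    exact Or.inl ⟨seeds, hseeds, hs⟩
  rw [if_pos hsK, buckets0_getD stn s PySem.Dict.empty (fun y => by simp [PySem.Dict.getD_empty])]
  rfl

-- ===== VERDICT (by name: the statement is the Claim_ definition above) =====
theorem map_seed_tree_numbers_to_seed_terms_spec : Claim_equal_map_seed_tree_numbers_to_seed_terms := by
  intro stn ttt _
  unfold Spec_map_seed_tree_numbers_to_seed_terms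
  rw [portA_eq, portB_eq]
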